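-- pv_equiv track=rewrite | github.com/jkpark-9997/jkpark--project | Student_Grades3.py | Rank_score
-- ===== SOURCE A (Python) =====
-- def Rank_score(ary):
--    rank_score = {}
-- #내림차순 정렬돼있으므로, 반복문을 통해 순서대로 등수(rank)부여
--    rank = 1
--    for score in ary:
--     if score not in rank_score:  # 점수가 딕셔너리에 저장되어있지 않을 시 등수저장.(중복을 피하기위해 동일한 점수가 이미 있는 경우 저장하지 않고 유지)
--         rank_score[score] = rank
--     rank += 1  # 다음 등수를 증가시킴
--    return rank_score
-- ===== SOURCE B (Python) =====
-- def Rank_score(ary):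
--     # Rank of a score = position of its first occurrence, 1-based.
--     return {s: ary.index(s) + 1 for s in dict.fromkeys(ary)}
-- ===== Notes on version B (the rewrite author's own statement) =====
-- stated objective: idiomatic
-- what changed: Replaces the forward loop with a rank counter and a membership-guarded insert by a dict comprehension over the deduplicated scores (dict.fromkeys) that computes each rank directly as first index + 1 via list.index.
import Mathlib
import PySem

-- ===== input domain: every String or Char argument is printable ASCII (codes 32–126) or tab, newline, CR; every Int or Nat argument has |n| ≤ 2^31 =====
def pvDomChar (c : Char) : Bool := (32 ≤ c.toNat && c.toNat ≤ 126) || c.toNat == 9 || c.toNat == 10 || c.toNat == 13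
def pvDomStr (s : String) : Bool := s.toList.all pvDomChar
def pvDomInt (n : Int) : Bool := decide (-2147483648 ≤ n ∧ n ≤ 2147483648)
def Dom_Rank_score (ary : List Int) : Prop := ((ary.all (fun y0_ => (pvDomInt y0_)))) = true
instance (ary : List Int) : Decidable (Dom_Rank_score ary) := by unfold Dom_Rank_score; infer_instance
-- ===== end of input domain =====

-- B replaces A's counter loop with its membership-guarded insert by a dict comprehension
-- over the deduplicated scores, each rank computed directly as first index + 1 (objective: idiomatic).

-- ===== PORT A =====
-- loop state: (rank_score dict, rank counter); returns the dict's items (insertion order)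
def Rank_score (ary : List Int) : List (Int × Int) :=
  (ary.foldl
    (fun (st : PySem.Dict Int Int × Int) score =>
      (if st.1.contains score then st.1 else st.1.insert score st.2, st.2 + 1))
    (PySem.Dict.empty, 1)).1.items

-- ===== PORT B =====
-- dict.fromkeys(ary) iterated = PySem.List.dedup; the comprehension builds a dict by inserting
-- s ↦ ary.index(s) + 1 for each distinct s (s ∈ ary, so .index cannot raise: getD 0 unreachable)
def Rank_score_alt (ary : List Int) : List (Int × Int) :=
  ((PySem.List.dedup ary).foldl
    (fun (d : PySem.Dict Int Int) s =>
      d.insert s (((PySem.List.index? ary s).getD 0 : Int) + 1))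
    PySem.Dict.empty).items

-- ===== PRECONDITION & SPEC =====
def Spec_Rank_score (ary : List Int) (out : List (Int × Int)) : Prop := out = Rank_score_alt ary
instance (ary : List Int) (out : List (Int × Int)) : Decidable (Spec_Rank_score ary out) := by unfold Spec_Rank_score; infer_instance

-- ===== CLAIM (what is proved, stated in full; the proofs are below) =====
def Claim_equal_Rank_score : Prop := ∀ (ary : List Int), Dom_Rank_score ary → Spec_Rank_score ary (Rank_score ary)

-- ===== LEMMAS AND PROOFS =====

-- the dict A has built after processing prefix `pre` of `full`, expressed as a literal pair list
def pvMkD (pre full : List Int) : PySem.Dict Int Int :=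
  PySem.Dict.mk ((PySem.List.dedup pre).map (fun s => (s, ((PySem.List.index? full s).getD 0 : Int) + 1)))

lemma pvContains_mkMap (l full : List Int) (x : Int) :
    (pvMkD l full).contains x = decide (x ∈ PySem.List.dedup l) := by
  simp [pvMkD, PySem.Dict.contains, List.any_map, Function.comp_def, List.any_beq']

lemma pvDedup_append_singleton (l : List Int) (x : Int) :
    PySem.List.dedup (l ++ [x]) =
      if x ∈ l then PySem.List.dedup l else PySem.List.dedup l ++ [x] := by
  simp only [PySem.List.dedup_eq_ofList, PySem.Set.ofList_eq_foldl, List.foldl_append]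
  simp only [List.foldl_cons, List.foldl_nil, PySem.Set.add, PySem.Set.contains]
  rw [← PySem.Set.ofList_eq_foldl]
  by_cases h : x ∈ l <;> simp [PySem.Set.mem_ofList, h]

lemma pvLoop_invariant (xs : List Int) : ∀ (pre full : List Int), pre ++ xs = full →
    xs.foldl
      (fun (st : PySem.Dict Int Int × Int) score =>
        (if st.1.contains score then st.1 else st.1.insert score st.2, st.2 + 1))
      (pvMkD pre full, (pre.length : Int) + 1)
    = (pvMkD full full, (full.length : Int) + 1) := by
  induction xs with
  | nil => intro pre full h; simp at h; subst h; rfl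
  | cons x xs ih =>
    intro pre full h
    rw [List.foldl_cons, pvContains_mkMap]
    by_cases hx : x ∈ pre
    · have hd : x ∈ PySem.List.dedup pre := (PySem.List.mem_dedup pre x).mpr hx
      simp only [hd, decide_true, if_true]
      have hMk : pvMkD (pre ++ [x]) full = pvMkD pre full := by
        unfold pvMkD; rw [pvDedup_append_singleton, if_pos hx]
      have := ih (pre ++ [x]) full (by simpa using h)
      rw [hMk] at this
      simpa using this
    · have hd : x ∉ PySem.List.dedup pre := fun hc => hx ((PySem.List.mem_dedup pre x).mp hc)
      simp only [hd, decide_false, Bool.false_eq_true, if_false]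
      have hidx : PySem.List.index? full x = some pre.length := by
        rw [← h, show pre ++ x :: xs = (pre ++ [x]) ++ xs by simp,
            PySem.List.index?_append_of_mem _ (by simp),
            PySem.List.index?_append_singleton_self (c := x) (l := pre) hx]
      have hMk : (pvMkD pre full).insert x ((pre.length : Int) + 1) = pvMkD (pre ++ [x]) full := by
        apply PySem.Dict.ext
        rw [PySem.Dict.items_insert_of_not_contains (pvMkD pre full) _
              (by rw [pvContains_mkMap]; simpa using hd)]
        unfold pvMkD
        rw [pvDedup_append_singleton, if_neg hx]
        simp only [PySem.List.index?_eq_idxOf?] at hidx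
        simp [hidx]
      rw [hMk]
      have := ih (pre ++ [x]) full (by simpa using h)
      simpa using this

-- B's comprehension inserts distinct fresh keys, so its items are exactly the mapped list
lemma pvAlt_items (ary : List Int) :
    Rank_score_alt ary =
      (PySem.List.dedup ary).map
        (fun s => (s, ((PySem.List.index? ary s).getD 0 : Int) + 1)) := by
  unfold Rank_score_alt
  have h := PySem.Dict.items_foldl_insert_fresh (l := PySem.List.dedup ary)
        (d := PySem.Dict.empty) (k := fun s => s)
        (v := fun s => ((PySem.List.index? ary s).getD 0 : Int) + 1)
        (by intro a _; simp [PySem.Dict.contains_empty])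
        (by simpa using PySem.List.nodup_dedup ary)
  simpa using h

-- ===== VERDICT (by name: the statement is the Claim_ definition above) =====
theorem Rank_score_spec : Claim_equal_Rank_score := by
  intro ary _
  unfold Spec_Rank_score Rank_score
  rw [pvAlt_items]
  have h := pvLoop_invariant ary [] ary rfl
  have h0 : (PySem.Dict.empty : PySem.Dict Int Int) = pvMkD [] ary := rfl
  rw [h0]
  simpa [pvMkD] using congrArg (fun st => st.1.items) h
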